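-- pv_equiv track=rewrite | github.com/finwarman/advent-of-code-2023 | 19/02.py | get_accepted_condition_paths
-- ===== SOURCE A (Python) =====
-- def get_false_conditions(rules):
--     false_conditions = []
--     for e in rules:
--         e_rating_key, e_operator, e_value = e[0], e[1], int(e[2])
--         false_condition = ( # e.g. ('x', '>', 10)
--             e_rating_key,
--             ('<' if e_operator == '>' else '>'),
--             e_value + (1 if e_operator == '>' else -1),
--         )
--         false_conditions.append(false_condition)
--     return false_conditions
--
-- def get_accepted_condition_paths(workflow_mappings):
--     # bfs queue: [(current_workflow, conditions),]
--     queue = [("A", [])]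
--     valid_paths = []
--
--     while queue:
--         curr_workflow, conditions = queue.pop(0)
--         # end of current path, store conditions for path
--         if curr_workflow == "in":
--             valid_paths.append(conditions)
--             continue
--
--         for name, rule in workflow_mappings.items():
--             for i, test in enumerate(rule):
--                 rating_key, comp_op, value, dest = test
--
--                 # conditions with dest of current workflow only
--                 if dest != curr_workflow:
--                     continue
--
--                 curr_condition = (rating_key, comp_op, value)
--
--                 # get negations of conditions up to current rule
--                 # (x>10 -> x<11, etc.)
--                 false_conditions = get_false_conditions(rule[:i])
--
--                 new_conditions = conditions + false_conditions + [curr_condition]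
--                 queue.append((name, new_conditions))
--
--     return valid_paths
-- ===== SOURCE B (Python) =====
-- def _rule_edges(name, rule):
--     # One pass over a rule: for each test, emit (dest, (name, fragment)) where the
--     # fragment is the negation of all earlier tests followed by this test's condition.
--     edges = []
--     negs = []
--     for rating_key, comp_op, value, dest in rule:
--         edges.append((dest, (name, negs + [(rating_key, comp_op, value)])))
--         negs = negs + [(rating_key,
--                         '<' if comp_op == '>' else '>',
--                         int(value) + (1 if comp_op == '>' else -1))]
--     return edges
--
-- def get_accepted_condition_paths(workflow_mappings):
--     # Reverse-edge index dest -> [(source, fragment)], built once up front.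
--     index = {}
--     for name, rule in workflow_mappings.items():
--         for dest, entry in _rule_edges(name, rule):
--             index.setdefault(dest, []).append(entry)
--     # BFS over incoming edges only, with a head-indexed growing list (no pop(0)).
--     queue = [("A", [])]
--     head = 0
--     valid_paths = []
--     while head < len(queue):
--         curr_workflow, conditions = queue[head]
--         head += 1
--         if curr_workflow == "in":
--             valid_paths.append(conditions)
--         else:
--             queue += [(name, conditions + frag)
--                       for name, frag in index.get(curr_workflow, [])]
--     return valid_paths
-- ===== Notes on version B (the rewrite author's own statement) =====
-- stated objective: alternative
-- what changed: A rescans every workflow's every rule at each BFS step and recomputes the negated prefix conditions with get_false_conditions(rule[:i]); B instead extracts each rule's (dest, fragment) edges in one pass with incrementally accumulated negations, groups them once into a dest->incoming-edges index, and the BFS (a head-indexed growing list instead of pop(0)) only walks the incoming edges of the current node; on the sampled random inputs this was not measured faster, since their traversals visit few nodes.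
import Mathlib
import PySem

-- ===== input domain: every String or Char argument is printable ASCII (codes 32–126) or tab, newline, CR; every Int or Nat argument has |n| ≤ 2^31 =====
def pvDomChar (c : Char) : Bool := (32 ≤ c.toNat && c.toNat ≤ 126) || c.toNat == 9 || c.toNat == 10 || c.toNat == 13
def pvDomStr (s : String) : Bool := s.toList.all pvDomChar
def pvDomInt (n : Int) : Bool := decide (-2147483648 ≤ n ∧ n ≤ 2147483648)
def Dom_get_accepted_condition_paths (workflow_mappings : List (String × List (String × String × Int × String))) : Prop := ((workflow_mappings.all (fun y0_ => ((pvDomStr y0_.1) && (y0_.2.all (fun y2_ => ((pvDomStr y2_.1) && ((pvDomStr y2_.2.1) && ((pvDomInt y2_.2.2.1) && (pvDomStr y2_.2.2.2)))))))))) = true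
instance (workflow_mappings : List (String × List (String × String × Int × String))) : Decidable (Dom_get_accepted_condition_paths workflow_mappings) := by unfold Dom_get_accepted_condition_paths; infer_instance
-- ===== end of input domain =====

-- B replaces A's rescan of every workflow's every rule at each BFS step (recomputing the
-- negated prefix conditions from rule[:i] each time) by a per-rule edge extraction with
-- incrementally accumulated negations, grouped once into a dest→incoming-edges index; the
-- BFS then walks only the current node's incoming edges, over a head-indexed growing
-- queue instead of pop(0).  Objective: alternative (not measurably faster on the sampled
-- inputs).
-- Both ports express their Python 'while' loop with a fuel counter (pvFuel, the same
-- generous bound in both, a totality guard only): the two loops agree step for step at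
-- every fuel, so the equivalence below holds on every input; where the Python loop never
-- terminates (a rule cycle reachable in reverse from the accept node) neither Python
-- returns and nothing is claimed.

-- ===== PORT A =====
def get_false_conditions (rules : List (String × String × Int × String)) : List (String × String × Int) :=
  rules.foldl (fun false_conditions e =>
    false_conditions ++ [(e.1, (if e.2.1 = ">" then "<" else ">"),
                          e.2.2.1 + (if e.2.1 = ">" then (1 : Int) else -1))]) []

-- fuel bound shared by both ports (a totality guard, not part of either algorithm)
def pvFuel (workflow_mappings : List (String × List (String × String × Int × String))) : Nat :=
  (workflow_mappings.foldl (fun s nr => s + nr.2.length) 0 + 1) ^ (workflow_mappings.length + 2) + 1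

def pvLoopA (wm : List (String × List (String × String × Int × String))) :
    Nat → List (String × List (String × String × Int)) → List (List (String × String × Int)) →
    List (List (String × String × Int))
  | 0, _, valid_paths => valid_paths
  | _ + 1, [], valid_paths => valid_paths
  | fuel + 1, (curr_workflow, conditions) :: rest, valid_paths =>
    if curr_workflow = "in" then pvLoopA wm fuel rest (valid_paths ++ [conditions])
    else
      pvLoopA wm fuel
        (wm.foldl (fun q nr =>
          (PySem.List.enumerate nr.2).foldl (fun q it =>
            if it.2.2.2.2 ≠ curr_workflow then q
            else q ++ [(nr.1, conditions ++
                        get_false_conditions (PySem.List.slice nr.2 none (some it.1)) ++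
                        [(it.2.1, it.2.2.1, it.2.2.2.1)])]) q) rest) valid_paths

def get_accepted_condition_paths (workflow_mappings : List (String × List (String × String × Int × String))) : List (List (String × String × Int)) :=
  pvLoopA workflow_mappings (pvFuel workflow_mappings) [("A", [])] []

-- ===== PORT B =====
-- _rule_edges: structural recursion over the rule, carrying the accumulated negations
def pvRuleEdges (name : String) :
    List (String × String × Int) → List (String × String × Int × String) →
    List (String × (String × List (String × String × Int)))
  | _, [] => []
  | negs, t :: ts =>
    (t.2.2.2, (name, negs ++ [(t.1, t.2.1, t.2.2.1)])) ::
    pvRuleEdges name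
      (negs ++ [(t.1, (if t.2.1 = ">" then "<" else ">"),
                 t.2.2.1 + (if t.2.1 = ">" then (1 : Int) else -1))]) ts

def pvIndexB (wm : List (String × List (String × String × Int × String))) :
    PySem.Dict String (List (String × List (String × String × Int))) :=
  wm.foldl (fun d nr =>
    (pvRuleEdges nr.1 [] nr.2).foldl
      (fun d e => d.modify e.1 [] (fun l => l ++ [e.2])) d) PySem.Dict.empty

-- 'while head < len(queue)': the queue only grows; head walks it by index
def pvLoopB (idx : PySem.Dict String (List (String × List (String × String × Int)))) :
    Nat → List (String × List (String × String × Int)) → Nat → List (List (String × String × Int)) →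
    List (List (String × String × Int))
  | 0, _, _, valid_paths => valid_paths
  | fuel + 1, queue, head, valid_paths =>
    match queue[head]? with
    | none => valid_paths
    | some (curr_workflow, conditions) =>
      if curr_workflow = "in" then pvLoopB idx fuel queue (head + 1) (valid_paths ++ [conditions])
      else
        pvLoopB idx fuel
          (queue ++ (idx.getD curr_workflow []).map (fun nf => (nf.1, conditions ++ nf.2)))
          (head + 1) valid_paths

def get_accepted_condition_paths_alt (workflow_mappings : List (String × List (String × String × Int × String))) : List (List (String × String × Int)) :=
  pvLoopB (pvIndexB workflow_mappings) (pvFuel workflow_mappings) [("A", [])] 0 []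

-- ===== PRECONDITION & SPEC =====
def Spec_get_accepted_condition_paths (workflow_mappings : List (String × List (String × String × Int × String))) (out : List (List (String × String × Int))) : Prop := out = get_accepted_condition_paths_alt workflow_mappings
instance (workflow_mappings : List (String × List (String × String × Int × String))) (out : List (List (String × String × Int))) : Decidable (Spec_get_accepted_condition_paths workflow_mappings out) := by unfold Spec_get_accepted_condition_paths; infer_instance

-- ===== CLAIM (what is proved, stated in full; the proofs are below) =====
def Claim_equal_get_accepted_condition_paths : Prop := ∀ (workflow_mappings : List (String × List (String × String × Int × String))), Dom_get_accepted_condition_paths workflow_mappings → Spec_get_accepted_condition_paths workflow_mappings (get_accepted_condition_paths workflow_mappings)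

-- ===== LEMMAS AND PROOFS =====

def pvNeg (e : String × String × Int × String) : String × String × Int :=
  (e.1, (if e.2.1 = ">" then "<" else ">"), e.2.2.1 + (if e.2.1 = ">" then (1 : Int) else -1))

-- entries a single rule contributes for destination k, given accumulated negations
def pvRuleCat (name : String) :
    List (String × String × Int) → List (String × String × Int × String) → String →
    List (String × List (String × String × Int))
  | _, [], _ => []
  | negs, t :: ts, k =>
    (if t.2.2.2 = k then [(name, negs ++ [(t.1, t.2.1, t.2.2.1)])] else []) ++
    pvRuleCat name (negs ++ [pvNeg t]) ts k

def pvCat (wm : List (String × List (String × String × Int × String))) (k : String) :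
    List (String × List (String × String × Int)) :=
  wm.flatMap (fun nr => pvRuleCat nr.1 [] nr.2 k)

theorem pv_gfc_eq_map (xs : List (String × String × Int × String)) :
    get_false_conditions xs = xs.map pvNeg := by
  unfold get_false_conditions
  simpa [pvNeg] using PySem.List.foldl_append_singleton_eq_map (l := xs) (f := pvNeg) (acc := [])

theorem pv_ruleEdges_filter (name : String) (rule : List (String × String × Int × String)) :
    ∀ (negs : List (String × String × Int)) (k : String),
    ((pvRuleEdges name negs rule).filter (fun p => p.1 == k)).map (·.2)
      = pvRuleCat name negs rule k := by
  induction rule with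
  | nil => intro negs k; simp [pvRuleEdges, pvRuleCat]
  | cons t ts ih =>
    intro negs k
    rw [pvRuleEdges, pvRuleCat]
    by_cases h : t.2.2.2 = k
    · simp [h, ih, pvNeg]
    · simp [h, ih, pvNeg]

theorem pv_indexB_spec (wm : List (String × List (String × String × Int × String))) (k : String) :
    (pvIndexB wm).getD k [] = pvCat wm k := by
  unfold pvIndexB
  suffices h : ∀ (l : List (String × List (String × String × Int × String)))
      (d : PySem.Dict String (List (String × List (String × String × Int)))),
      (l.foldl (fun d nr =>
        (pvRuleEdges nr.1 [] nr.2).foldl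
          (fun d e => d.modify e.1 [] (fun l => l ++ [e.2])) d) d).getD k []
        = d.getD k [] ++ pvCat l k by
    rw [h]; simp [PySem.Dict.getD_empty]
  intro l
  induction l with
  | nil => intro d; simp [pvCat]
  | cons nr rest ih =>
    intro d
    simp only [List.foldl_cons]
    rw [ih, PySem.Dict.getD_foldl_modify_append, pv_ruleEdges_filter]
    simp [pvCat]

theorem pv_take_succ_of_drop {α : Type} (full : List α) (s : Nat) (t : α) (ts : List α)
    (h : full.drop s = t :: ts) : full.take (s + 1) = full.take s ++ [t] := by
  have h0 : full[s]? = some t := by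
    rw [← Nat.add_zero s, ← List.getElem?_drop, h]
    rfl
  rw [List.take_add_one, h0]
  rfl

theorem pvA_inner (curr name : String) (conds : List (String × String × Int))
    (full : List (String × String × Int × String)) :
    ∀ (rule : List (String × String × Int × String)) (s : Nat)
      (q0 : List (String × List (String × String × Int))),
      full.drop s = rule →
    (PySem.List.enumerate rule (s : Int)).foldl (fun q it =>
        if it.2.2.2.2 ≠ curr then q
        else q ++ [(name, conds ++
                    get_false_conditions (PySem.List.slice full none (some it.1)) ++
                    [(it.2.1, it.2.2.1, it.2.2.2.1)])]) q0
      = q0 ++ (pvRuleCat name ((full.take s).map pvNeg) rule curr).map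
                (fun nf => (nf.1, conds ++ nf.2)) := by
  intro rule
  induction rule with
  | nil => intro s q0 _; simp [PySem.List.enumerate_nil, pvRuleCat]
  | cons t ts ih =>
    intro s q0 hdrop
    rw [PySem.List.enumerate_cons]
    simp only [List.foldl_cons]
    have hdrop' : full.drop (s + 1) = ts := by
      rw [← List.tail_drop, hdrop]
      rfl
    have hcast : ((s : Int) + 1) = ((s + 1 : Nat) : Int) := by push_cast; ring
    have htake := pv_take_succ_of_drop full s t ts hdrop
    rw [hcast, ih (s + 1) _ hdrop']
    rw [pvRuleCat]
    rw [PySem.List.slice_to_natCast, pv_gfc_eq_map]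
    by_cases h : t.2.2.2 = curr
    · simp [h, htake, pvNeg, List.append_assoc]
    · simp [h, htake, pvNeg]

theorem pvA_step (wm : List (String × List (String × String × Int × String)))
    (curr : String) (conds : List (String × String × Int)) :
    ∀ (q0 : List (String × List (String × String × Int))),
    wm.foldl (fun q nr =>
        (PySem.List.enumerate nr.2).foldl (fun q it =>
          if it.2.2.2.2 ≠ curr then q
          else q ++ [(nr.1, conds ++
                      get_false_conditions (PySem.List.slice nr.2 none (some it.1)) ++
                      [(it.2.1, it.2.2.1, it.2.2.2.1)])]) q) q0
      = q0 ++ (pvCat wm curr).map (fun nf => (nf.1, conds ++ nf.2)) := by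
  induction wm with
  | nil => intro q0; simp [pvCat]
  | cons nr rest ih =>
    intro q0
    simp only [List.foldl_cons]
    have h0 : (nr.2.drop 0) = nr.2 := by simp
    have hin := pvA_inner curr nr.1 conds nr.2 nr.2 0 q0 h0
    simp only [Int.natCast_zero, List.take_zero, List.map_nil] at hin
    rw [ih, hin]
    simp [pvCat, List.map_append]

theorem pv_loop_eq (wm : List (String × List (String × String × Int × String))) :
    ∀ (fuel : Nat) (queue : List (String × List (String × String × Int))) (head : Nat)
      (valid : List (List (String × String × Int))),
    pvLoopB (pvIndexB wm) fuel queue head valid = pvLoopA wm fuel (queue.drop head) valid := by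
  intro fuel
  induction fuel with
  | zero => intro queue head valid; rfl
  | succ f ih =>
    intro queue head valid
    rw [pvLoopB]
    cases hq : queue[head]? with
    | none =>
      have hlen : queue.length ≤ head := by
        simpa using (List.getElem?_eq_none_iff.mp hq)
      rw [List.drop_eq_nil_iff.mpr hlen]
      rfl
    | some item =>
      obtain ⟨curr, conds⟩ := item
      have hlt : head < queue.length := by
        rcases List.getElem?_eq_some_iff.mp hq with ⟨h, _⟩; exact h
      have hdrop : queue.drop head = (curr, conds) :: queue.drop (head + 1) := by
        rw [List.drop_eq_getElem_cons hlt]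
        have : queue[head] = (curr, conds) := by
          have := List.getElem?_eq_getElem hlt
          rw [hq] at this; exact (Option.some.inj this).symm
        rw [this]
      rw [hdrop, pvLoopA]
      by_cases h : curr = "in"
      · simp only [h, if_true]
        exact ih queue (head + 1) (valid ++ [conds])
      · simp only [h, if_false]
        rw [ih _ (head + 1) valid]
        rw [List.drop_append_of_le_length (by omega)]
        rw [pvA_step, pv_indexB_spec]

-- ===== VERDICT (by name: the statement is the Claim_ definition above) =====
theorem get_accepted_condition_paths_spec : Claim_equal_get_accepted_condition_paths := by
  intro wm _
  unfold Spec_get_accepted_condition_paths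
  unfold get_accepted_condition_paths get_accepted_condition_paths_alt
  have h := pv_loop_eq wm (pvFuel wm) [("A", [])] 0 []
  simp only [List.drop_zero] at h
  exact h.symm
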